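-- pv_equiv track=rewrite | github.com/idleh4021/study-algorithm | Python3/프로그래머스/1/258712. 가장 많이 받은 선물/가장 많이 받은 선물.py | solution
-- ===== SOURCE A (Python) =====
-- from collections import Counter
--
-- def solution(friends, gifts):
--     answer = 0
--     gift_score={}
--     log = dict(Counter(gifts))
--     get_gift_cnt ={}
--     for i in friends:
--         get_gift_cnt[i]=0
--         gift_score[i]=0
--     for i in log:
--         s,r = i.split()
--         gift_score[s] = log[i] if s not in gift_score else gift_score[s]+log[i]
--         gift_score[r] = -log[i] if r not in gift_score else gift_score[r]-log[i]
--
--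
--
--
--     for f_idx in range(len(friends)):
--         for r_idx in range(f_idx+1,len(friends)):
--             f = friends[f_idx]
--             r= friends[r_idx]
--             if f==r:continue
--             f_to_r = log[f'{f} {r}'] if (f'{f} {r}') in log else 0
--             r_to_f = log[f'{r} {f}'] if (f'{r} {f}') in log else 0
--             if f_to_r>r_to_f:
--                 get_gift_cnt[f] +=1
--             elif f_to_r<r_to_f:
--                 get_gift_cnt[r] +=1
--             else:
--                 if gift_score[f]>gift_score[r]:
--                     get_gift_cnt[f] +=1
--                 elif gift_score[f]<gift_score[r]:
--                     get_gift_cnt[r] +=1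
--                 else : continue
--
--     return max(get_gift_cnt[i] for i in get_gift_cnt)
-- ===== SOURCE B (Python) =====
-- def solution(friends, gifts):
--     # One pass over gifts: net score per name and directed pair counts.
--     score = {}
--     cnt = {}
--     for g in gifts:
--         s, r = g.split()
--         score[s] = score.get(s, 0) + 1
--         score[r] = score.get(r, 0) - 1
--         cnt[(s, r)] = cnt.get((s, r), 0) + 1
--
--     fscore = {f: score.get(f, 0) for f in friends}
--
--     # Baseline: give every pair's point to the higher-score friend, so each
--     # friend starts with the number of friends of strictly smaller score,
--     # read off the sorted score list via first-occurrence indices.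
--     svals = sorted(fscore[f] for f in friends)
--     first = {}
--     for i, v in enumerate(svals):
--         if v not in first:
--             first[v] = i
--     wins = {f: first[fscore[f]] for f in friends}
--
--     # Correct exactly the unordered friend pairs whose gift counts are
--     # unbalanced: there the point goes to the bigger giver instead.
--     done = set()
--     for (s, r) in cnt:
--         if s == r or s not in wins or r not in wins:
--             continue
--         key = (s, r) if s < r else (r, s)
--         if key in done:
--             continue
--         done.add(key)
--         a = cnt.get((s, r), 0)
--         b = cnt.get((r, s), 0)
--         if a == b:
--             continue
--         if fscore[s] > fscore[r]:
--             wins[s] -= 1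
--         elif fscore[s] < fscore[r]:
--             wins[r] -= 1
--         if a > b:
--             wins[s] += 1
--         else:
--             wins[r] += 1
--     return max(wins[f] for f in friends)
-- ===== Notes on version B (the rewrite author's own statement) =====
-- stated objective: faster
-- what changed: Replaces A's triangular pairwise adjudication by a sort-based scheme: one pass builds net scores and directed pair counts, each friend's win count is initialised to the number of strictly-lower-score friends read off first-occurrence indices of the sorted score list, and only the unordered pairs with unbalanced gift counts (at most one per gift) are corrected, so no quadratic pair scan remains.
-- outside the precondition, e.g. on solution(['a', 'b', 'a'], ['a b']): A returns 2, B returns 1; on solution(['a', 'b'], ['a  b', 'b a']): A returns 1, B returns 0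
import Mathlib
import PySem

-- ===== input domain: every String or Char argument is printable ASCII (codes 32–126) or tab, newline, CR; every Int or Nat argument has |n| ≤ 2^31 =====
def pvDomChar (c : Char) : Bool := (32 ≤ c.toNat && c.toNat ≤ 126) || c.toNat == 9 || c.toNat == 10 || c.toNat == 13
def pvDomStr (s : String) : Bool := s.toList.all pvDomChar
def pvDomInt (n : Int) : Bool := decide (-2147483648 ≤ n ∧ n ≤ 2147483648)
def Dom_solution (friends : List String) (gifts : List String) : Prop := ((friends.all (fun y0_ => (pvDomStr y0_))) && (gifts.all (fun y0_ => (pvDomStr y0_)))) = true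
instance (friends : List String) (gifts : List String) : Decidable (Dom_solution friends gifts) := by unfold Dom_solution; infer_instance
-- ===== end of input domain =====

-- B replaces A's O(n^2) triangular pairwise adjudication by a sort-based scheme (baseline = number of
-- strictly-lower-score friends, then corrections only for pairs with unbalanced gift counts): faster.

-- shared formatting helper: the Python f-string f'{f} {r}' (A's dict key / B's counted gift string)
def pvKey (f r : String) : String := PySem.Str.join " " [f, r]

-- ===== PORT A =====
-- 'for i in friends: get_gift_cnt[i]=0; gift_score[i]=0'
def pvInitA (friends : List String) : PySem.Dict String Int × PySem.Dict String Int :=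
  friends.foldl (fun p i => (p.1.insert i 0, p.2.insert i 0)) (PySem.Dict.empty, PySem.Dict.empty)

-- one iteration of 'for i in log': s,r = i.split(); the two set-or-add updates of gift_score.
-- Python raises ValueError when i does not split into exactly two words — excluded by Pre_; the
-- catch-all branch is unreachable there. log[i] is a present-key lookup, ported as getD _ 0 (exact).
def pvScoreStepA (log : PySem.Dict String Int) (sc : PySem.Dict String Int) (i : String) :
    PySem.Dict String Int :=
  match PySem.Str.split₀ i with
  | [s, r] =>
    let sc := if sc.contains s then sc.insert s (sc.getD s 0 + log.getD i 0)
              else sc.insert s (log.getD i 0)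
    if sc.contains r then sc.insert r (sc.getD r 0 - log.getD i 0)
    else sc.insert r (-(log.getD i 0))
  | _ => sc

-- the body of the triangular double loop for one pair (f, r); get_gift_cnt[f] += 1 is a
-- present-key update, ported as insert f (getD f 0 + 1) (exact: f, r are friends).
def pvTriStepA (log score : PySem.Dict String Int) (f r : String) (cnt : PySem.Dict String Int) :
    PySem.Dict String Int :=
  if f = r then cnt
  else
    let fToR := if log.contains (pvKey f r) then log.getD (pvKey f r) 0 else 0
    let rToF := if log.contains (pvKey r f) then log.getD (pvKey r f) 0 else 0
    if fToR > rToF then cnt.insert f (cnt.getD f 0 + 1)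
    else if fToR < rToF then cnt.insert r (cnt.getD r 0 + 1)
    else if score.getD f 0 > score.getD r 0 then cnt.insert f (cnt.getD f 0 + 1)
    else if score.getD f 0 < score.getD r 0 then cnt.insert r (cnt.getD r 0 + 1)
    else cnt

def solution (friends : List String) (gifts : List String) : Int :=
  let log := PySem.Dict.counter gifts            -- log = dict(Counter(gifts))
  let p := pvInitA friends                       -- (get_gift_cnt, gift_score) initialised to 0
  let score := log.keys.foldl (pvScoreStepA log) p.2
  let n := PySem.List.len friends
  let cnt := (PySem.List.pyRange 0 n).foldl (fun cnt fi =>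
      (PySem.List.pyRange (fi + 1) n).foldl (fun cnt ri =>
        pvTriStepA log score (PySem.List.pyGetD friends fi "") (PySem.List.pyGetD friends ri "") cnt)
        cnt) p.1
  match PySem.List.max? cnt.values (fun y => y) with   -- max(...) raises on empty: excluded by Pre_
  | some m => m
  | none => 0

-- ===== PORT B =====
-- one iteration of 'for g in gifts': s,r = g.split(); score and directed pair-count updates.
-- bad split raises ValueError: excluded by Pre_, the catch-all branch is unreachable there.
def pvPassB (st : PySem.Dict String Int × PySem.Dict (String × String) Int) (g : String) :
    PySem.Dict String Int × PySem.Dict (String × String) Int :=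
  match PySem.Str.split₀ g with
  | [s, r] =>
    let sc := st.1.insert s (st.1.getD s 0 + 1)
    let sc := sc.insert r (sc.getD r 0 - 1)
    (sc, st.2.insert (s, r) (st.2.getD (s, r) 0 + 1))
  | _ => st

-- 'if v not in first: first[v] = i' over enumerate(svals)
def pvFirstStep (d : PySem.Dict Int Int) (iv : Int × Int) : PySem.Dict Int Int :=
  if d.contains iv.2 then d else d.insert iv.2 iv.1

-- the body of 'for (s, r) in cnt' — state is (done, wins); fscore[s]/wins[s] are present-key
-- lookups/updates (s, r are friends there), ported as getD _ 0 / insert (exact).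
def pvCorrStep (cnt : PySem.Dict (String × String) Int) (fscore : PySem.Dict String Int)
    (st : PySem.Set (String × String) × PySem.Dict String Int) (p : String × String) :
    PySem.Set (String × String) × PySem.Dict String Int :=
  if p.1 = p.2 ∨ ¬ st.2.contains p.1 ∨ ¬ st.2.contains p.2 then st
  else
    let key := if p.1 < p.2 then p else (p.2, p.1)
    if PySem.Set.contains st.1 key then st
    else
      let done := PySem.Set.add st.1 key
      let a := cnt.getD p 0
      let b := cnt.getD (p.2, p.1) 0
      if a = b then (done, st.2)
      else
        let w := if fscore.getD p.1 0 > fscore.getD p.2 0 then st.2.insert p.1 (st.2.getD p.1 0 - 1)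
                 else if fscore.getD p.1 0 < fscore.getD p.2 0 then st.2.insert p.2 (st.2.getD p.2 0 - 1)
                 else st.2
        let w := if a > b then w.insert p.1 (w.getD p.1 0 + 1) else w.insert p.2 (w.getD p.2 0 + 1)
        (done, w)

def solution_alt (friends : List String) (gifts : List String) : Int :=
  let st := gifts.foldl pvPassB (PySem.Dict.empty, PySem.Dict.empty)
  let score := st.1
  let cnt := st.2
  -- fscore = {f: score.get(f, 0) for f in friends}
  let fscore := friends.foldl (fun d f => d.insert f (score.getD f 0)) PySem.Dict.empty
  -- svals = sorted(fscore[f] for f in friends); fscore[f] is a present-key lookup (exact as getD _ 0)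
  let svals := PySem.List.sorted (friends.map (fun f => fscore.getD f 0)) (fun v => v) false
  let first := (PySem.List.enumerate svals).foldl pvFirstStep PySem.Dict.empty
  -- wins = {f: first[fscore[f]] for f in friends}; first[fscore[f]] is always a present key
  let wins0 := friends.foldl (fun d f => d.insert f (first.getD (fscore.getD f 0) 0)) PySem.Dict.empty
  let wins := (cnt.keys.foldl (pvCorrStep cnt fscore) (PySem.Set.empty, wins0)).2
  match PySem.List.max? (friends.map (fun f => wins.getD f 0)) (fun y => y) with
  | some m => m                                  -- max(...) raises on empty friends: excluded by Pre_
  | none => 0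

-- ===== PRECONDITION & SPEC =====
-- Pre_ excludes: empty friends and gifts that do not split into exactly two words (Python A raises
-- ValueError on both); duplicate names in friends, on which A's accumulation of every index pair
-- into one shared dict key is an accident of its dict representation; and gifts that are not the
-- canonical 'giver receiver' single-space form guaranteed by the problem, on which A scores by the
-- split but counts by the literal string — an artefact of its log-keyed lookups (both defensible).
def Pre_solution (friends : List String) (gifts : List String) : Prop :=
  friends ≠ [] ∧ friends.Nodup ∧
  ∀ g ∈ gifts, (PySem.Str.split₀ g).length = 2 ∧
    PySem.Str.join " " (PySem.Str.split₀ g) = g ∧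
    ∀ t ∈ PySem.Str.split₀ g, t.toList.all (fun c => !PySem.Chars.isspace c) = true
instance (friends : List String) (gifts : List String) : Decidable (Pre_solution friends gifts) := by
  unfold Pre_solution; infer_instance

def pvWitness_solution : List String × List String := (["a", "b"], ["a b"])

def Spec_solution (friends : List String) (gifts : List String) (out : Int) : Prop :=
  out = solution_alt friends gifts
instance (friends : List String) (gifts : List String) (out : Int) :
    Decidable (Spec_solution friends gifts out) := by unfold Spec_solution; infer_instance

-- ===== CLAIM (what is proved, stated in full; the proofs are below) =====
def Claim_equal_solution : Prop := ∀ (friends : List String) (gifts : List String),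
  Dom_solution friends gifts → Pre_solution friends gifts →
  Spec_solution friends gifts (solution friends gifts)

-- ===== LEMMAS AND PROOFS =====

-- net contribution of one gift string to x's gift score
def pvDelta (g x : String) : Int :=
  match PySem.Str.split₀ g with
  | [s, r] => (if s = x then 1 else 0) - (if r = x then 1 else 0)
  | _ => 0

-- the canonical net score of name x
def pvScore (gifts : List String) (x : String) : Int := (gifts.map (fun g => pvDelta g x)).sum

-- the (giver, receiver) token pair of a gift string (junk value on a malformed gift)
def pvPairOf (g : String) : String × String :=
  match PySem.Str.split₀ g with
  | [s, r] => (s, r)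
  | _ => ("", "")

-- the canonical strict win relation: more gifts given, score tiebreak
def pvBeats (gifts : List String) (f g : String) : Bool :=
  decide ((List.count (pvKey g f) gifts : Int) < (List.count (pvKey f g) gifts : Int))
    || (decide ((List.count (pvKey f g) gifts : Int) = (List.count (pvKey g f) gifts : Int))
        && decide (pvScore gifts g < pvScore gifts f))

-- the canonical per-friend win count and final answer
def pvWins (gifts friends : List String) (f : String) : Int :=
  (friends.countP (fun g => g != f && pvBeats gifts f g) : Int)

def pvCanon (friends gifts : List String) : Int :=
  match PySem.List.max? (friends.map (fun f => pvWins gifts friends f)) (fun y => y) with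
  | some m => m
  | none => 0

-- B's per-pair correction, as it affects friend x
def pvCorr (gifts : List String) (p : String × String) (x : String) : Int :=
  if (List.count (pvKey p.1 p.2) gifts : Int) = (List.count (pvKey p.2 p.1) gifts : Int) then 0
  else (if (List.count (pvKey p.2 p.1) gifts : Int) < (List.count (pvKey p.1 p.2) gifts : Int)
        then (if p.1 = x then (1 : Int) else 0) else (if p.2 = x then (1 : Int) else 0))
     - (if pvScore gifts p.2 < pvScore gifts p.1 then (if p.1 = x then (1 : Int) else 0)
        else if pvScore gifts p.1 < pvScore gifts p.2 then (if p.2 = x then (1 : Int) else 0) else 0)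

def pvCanonP (p : String × String) : String × String := if p.1 < p.2 then p else (p.2, p.1)

def pvElig (friends : List String) (p : String × String) : Bool :=
  decide (p.1 ≠ p.2) && decide (p.1 ∈ friends) && decide (p.2 ∈ friends)

-- sum of f over the DISTINCT elements of a list (first occurrences)
def pvSumD {α : Type} [DecidableEq α] (f : α → Int) : List α → Int
  | [] => 0
  | a :: t => f a + pvSumD f (t.filter (· ≠ a))
termination_by l => l.length
decreasing_by
  have h1 : ((List.filter (fun x => decide (x.1 ≠ a)) t.attach).unattach).length
      ≤ t.attach.length := by
    rw [List.length_unattach]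
    exact List.length_filter_le _ _
  simp only [List.length_attach] at h1
  exact Nat.lt_succ_of_le h1

-- the canonical meaning of Pre_'s per-gift condition
def pvCanonGift (g : String) : Prop :=
  (PySem.Str.split₀ g).length = 2 ∧ PySem.Str.join " " (PySem.Str.split₀ g) = g ∧
    ∀ t ∈ PySem.Str.split₀ g, t.toList.all (fun c => !PySem.Chars.isspace c) = true

-- ---------- string decomposition ----------

lemma pv_join_toList (s r : String) :
    (PySem.Str.join " " [s, r]).toList = s.toList ++ ' ' :: r.toList := by
  rw [PySem.Str.toList_join]; simp [PySem.Chars.join, List.intercalate]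

lemma pv_uniq (as bs : List Char) : ∀ (cs ds : List Char),
    (∀ c ∈ as, PySem.Chars.isspace c = false) → (∀ c ∈ bs, PySem.Chars.isspace c = false) →
    as ++ ' ' :: bs = cs ++ ' ' :: ds → as = cs ∧ bs = ds := by
  induction as with
  | nil =>
    intro cs ds _ hb h
    cases cs with
    | nil => simpa using h
    | cons c cs' =>
      simp only [List.nil_append, List.cons_append, List.cons.injEq] at h
      obtain ⟨rfl, h2⟩ := h
      exfalso
      have : PySem.Chars.isspace ' ' = false := hb ' ' (by rw [h2]; simp)
      simp [PySem.Chars.isspace] at this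
  | cons a as' ih =>
    intro cs ds ha hb h
    cases cs with
    | nil =>
      simp only [List.cons_append, List.nil_append, List.cons.injEq] at h
      exfalso
      have : PySem.Chars.isspace ' ' = false := by
        have := ha a (by simp)
        rwa [h.1] at this
      simp [PySem.Chars.isspace] at this
    | cons c cs' =>
      simp only [List.cons_append, List.cons.injEq] at h
      obtain ⟨rfl, h2⟩ := h
      obtain ⟨e1, e2⟩ := ih cs' ds (fun c hc => ha c (by simp [hc])) hb h2
      exact ⟨by rw [e1], e2⟩

-- for a canonical gift g: g equals the key string "f r" iff its token pair is (f, r)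
lemma pv_key_iff (g : String) (hg : pvCanonGift g) (f r : String) :
    g = pvKey f r ↔ pvPairOf g = (f, r) := by
  obtain ⟨hlen, hjoin, hclean⟩ := hg
  rcases h : PySem.Str.split₀ g with _ | ⟨s, _ | ⟨r', _ | _⟩⟩ <;> rw [h] at hlen <;> simp at hlen
  rw [h] at hjoin
  have hs := hclean s (by rw [h]; simp)
  have hr := hclean r' (by rw [h]; simp)
  simp only [List.all_eq_true, Bool.not_eq_eq_eq_not, Bool.not_true] at hs hr
  constructor
  · intro he
    have : (PySem.Str.join " " [s, r']).toList = (pvKey f r).toList := by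
      rw [hjoin, he]
    rw [pv_join_toList, pvKey, pv_join_toList] at this
    obtain ⟨e1, e2⟩ := pv_uniq s.toList r'.toList f.toList r.toList hs hr this
    simp [pvPairOf, h, String.toList_inj.mp e1, String.toList_inj.mp e2]
  · intro he
    simp only [pvPairOf, h, Prod.mk.injEq] at he
    rw [← hjoin, pvKey, he.1, he.2]

-- A's string-count of "f r" = the pair-count of (f, r) over the token pairs
lemma pv_count_key (gifts : List String) (hg : ∀ g ∈ gifts, pvCanonGift g) (f r : String) :
    List.count (pvKey f r) gifts = List.count (f, r) (gifts.map pvPairOf) := by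
  simp only [List.count, List.countP_map]
  apply List.countP_congr
  intro g hgm
  have := pv_key_iff g (hg g hgm) f r
  simp only [Function.comp_apply, beq_iff_eq]
  exact this

-- ---------- generic small lemmas ----------

lemma pv_countP_int {α : Type} (l : List α) (p : α → Bool) :
    ((l.countP p : Int)) = (l.map (fun x => if p x then (1 : Int) else 0)).sum := by
  induction l with
  | nil => simp
  | cons a t ih => by_cases h : p a <;> simp [List.countP_cons, h, ih] <;> omega

lemma pv_tab_getD (l : List String) (v : String → Int) :
    ∀ (d : PySem.Dict String Int) (x : String),
    ((l.foldl (fun d f => d.insert f (v f)) d).getD x 0) = if x ∈ l then v x else d.getD x 0 := by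
  induction l with
  | nil => simp
  | cons a t ih =>
    intro d x
    simp only [List.foldl_cons, ih, List.mem_cons]
    by_cases hx : x ∈ t
    · simp [hx]
    · rw [PySem.Dict.getD_insert]
      by_cases hxa : x = a <;> simp [hxa, hx]

lemma pv_tab_contains (l : List String) (v : String → Int) :
    ∀ (d : PySem.Dict String Int) (x : String),
    ((l.foldl (fun d f => d.insert f (v f)) d).contains x) = (decide (x ∈ l) || d.contains x) := by
  induction l with
  | nil => simp
  | cons a t ih =>
    intro d x
    simp only [List.foldl_cons, ih, PySem.Dict.contains_insert, List.mem_cons]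
    by_cases hx : x ∈ t <;> by_cases hxa : x = a <;> simp [hx, hxa]

-- ---------- B's score/cnt pass ----------

def pvScoreStepB (sc : PySem.Dict String Int) (g : String) : PySem.Dict String Int :=
  match PySem.Str.split₀ g with
  | [s, r] =>
    let sc := sc.insert s (sc.getD s 0 + 1)
    sc.insert r (sc.getD r 0 - 1)
  | _ => sc

def pvCntStepB (d : PySem.Dict (String × String) Int) (g : String) :
    PySem.Dict (String × String) Int :=
  match PySem.Str.split₀ g with
  | [s, r] => d.insert (s, r) (d.getD (s, r) 0 + 1)
  | _ => d

lemma pv_passB_eq (st : PySem.Dict String Int × PySem.Dict (String × String) Int) (g : String) :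
    pvPassB st g = (pvScoreStepB st.1 g, pvCntStepB st.2 g) := by
  obtain ⟨a, b⟩ := st
  unfold pvPassB pvScoreStepB pvCntStepB
  rcases h : PySem.Str.split₀ g with _ | ⟨s, _ | ⟨r, _ | _⟩⟩ <;> rfl

lemma pv_passB_split (gifts : List String) :
    gifts.foldl pvPassB (PySem.Dict.empty, PySem.Dict.empty)
      = (gifts.foldl pvScoreStepB PySem.Dict.empty, gifts.foldl pvCntStepB PySem.Dict.empty) := by
  rw [PySem.List.foldl_congr_mem gifts pvPassB
    (fun st g => (pvScoreStepB st.1 g, pvCntStepB st.2 g)) _ (fun st g _ => pv_passB_eq st g)]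
  exact PySem.List.foldl_prod_mk _ _ _ _ _
lemma pv_stepB_getD (sc : PySem.Dict String Int) (g x : String) :
    (pvScoreStepB sc g).getD x 0 = sc.getD x 0 + pvDelta g x := by
  unfold pvScoreStepB pvDelta
  rcases h : PySem.Str.split₀ g with _ | ⟨s, _ | ⟨r, _ | _⟩⟩ <;>
    simp only [PySem.Dict.getD_insert] <;> first | (split_ifs <;> subst_vars <;> first | omega | exact absurd rfl (by assumption)) | omega

lemma pv_scoreB_getD (gifts : List String) (sc : PySem.Dict String Int) (x : String) :
    (gifts.foldl pvScoreStepB sc).getD x 0 = sc.getD x 0 + pvScore gifts x := by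
  unfold pvScore
  induction gifts generalizing sc with
  | nil => simp
  | cons g gs ih => simp [List.foldl_cons, ih, pv_stepB_getD]; ring

lemma pv_cnt_eq_counter (gifts : List String)
    (h : ∀ g ∈ gifts, (PySem.Str.split₀ g).length = 2) :
    gifts.foldl pvCntStepB PySem.Dict.empty = PySem.Dict.counter (gifts.map pvPairOf) := by
  rw [← PySem.Dict.foldl_insert_getD_add_one_eq_counter, List.foldl_map]
  apply PySem.List.foldl_congr_mem
  intro d g hgm
  have := h g hgm
  unfold pvCntStepB pvPairOf
  rcases hs : PySem.Str.split₀ g with _ | ⟨s, _ | ⟨r, _ | _⟩⟩ <;> rw [hs] at this <;> simp_all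
-- ---------- the first-occurrence-index dict over the sorted score list ----------

lemma pv_first_getD (xs : List Int) :
    ∀ (s : Int) (d : PySem.Dict Int Int) (v : Int),
    (((PySem.List.enumerate xs s).foldl pvFirstStep d).getD v 0)
      = if d.contains v then d.getD v 0 else if v ∈ xs then s + (xs.idxOf v : Int) else 0 := by
  induction xs with
  | nil => intro s d v; simp [PySem.List.enumerate_nil]; intro h; rw [PySem.Dict.getD_of_not_contains d 0 (by simpa using h)]
  | cons x t ih =>
    intro s d v
    rw [PySem.List.enumerate_cons, List.foldl_cons]
    rw [ih]
    unfold pvFirstStep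
    by_cases hdx : d.contains x = true
    · simp only [hdx, if_true]
      by_cases hdv : d.contains v = true
      · simp [hdv]
      · have hnv : d.contains v = false := by simpa using hdv
        have hvx : v ≠ x := by rintro rfl; rw [hdx] at hnv; simp at hnv
        simp only [hnv, Bool.false_eq_true, if_false, List.mem_cons, hvx, false_or]
        by_cases hvt : v ∈ t
        · rw [if_pos hvt, if_pos hvt, List.idxOf_cons_ne _ (fun e => hvx e.symm)]
          push_cast; ring
        · rw [if_neg hvt, if_neg hvt]
    · have hnx : d.contains x = false := by simpa using hdx
      simp only [hnx, Bool.false_eq_true, if_false]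
      rw [PySem.Dict.contains_insert]
      by_cases hvx : v = x
      · subst hvx
        simp only [beq_self_eq_true, Bool.true_or, if_true, hnx]
        rw [PySem.Dict.getD_insert, if_pos rfl]
        simp [List.idxOf_cons_self]
      · have : ((v == x) || d.contains v) = d.contains v := by simp [hvx]
        rw [this]
        by_cases hdv : d.contains v = true
        · rw [if_pos hdv, if_pos hdv, PySem.Dict.getD_insert, if_neg hvx]
        · have hnv : d.contains v = false := by simpa using hdv
          simp only [hnv, Bool.false_eq_true, if_false]
          by_cases hvt : v ∈ t
          · rw [if_pos hvt, if_pos (by simp [hvt]), List.idxOf_cons_ne _ (by exact fun e => hvx e.symm)]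
            push_cast; ring
          · rw [if_neg hvt, if_neg (by simp [hvx, hvt])]
lemma pv_idxOf_sorted (S : List Int) (hS : S.Pairwise (fun a b => a ≤ b)) (v : Int)
    (hv : v ∈ S) : S.idxOf v = S.countP (fun y => decide (y < v)) := by
  induction S with
  | nil => simp at hv
  | cons a t ih =>
    rw [List.pairwise_cons] at hS
    obtain ⟨hall, ht⟩ := hS
    rcases List.mem_cons.mp hv with rfl | hvt
    · rw [List.idxOf_cons_self, List.countP_cons]
      have h0 : t.countP (fun y => decide (y < v)) = 0 := by
        rw [List.countP_eq_zero]
        intro y hy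
        simpa using not_lt.mpr (hall y hy)
      simp [h0]
    · have hav : a ≤ v := hall v hvt
      by_cases hva : v = a
      · subst hva
        rw [List.idxOf_cons_self, List.countP_cons]
        have h0 : t.countP (fun y => decide (y < v)) = 0 := by
          rw [List.countP_eq_zero]
          intro y hy
          simpa using not_lt.mpr (hall y hy)
        simp [h0]
      · rw [List.idxOf_cons_ne _ (fun e => hva e.symm), List.countP_cons, ih ht hvt]
        have : a < v := lt_of_le_of_ne hav (fun e => hva e.symm)
        simp [this]
-- ---------- the correction fold ----------

lemma pv_corr_symm (gifts : List String) (p : String × String) (x : String) :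
    pvCorr gifts (p.2, p.1) x = pvCorr gifts p x := by
  unfold pvCorr; dsimp only; split_ifs <;> omega

lemma pv_corr_canon (gifts : List String) (p : String × String) (x : String) :
    pvCorr gifts (pvCanonP p) x = pvCorr gifts p x := by
  unfold pvCanonP
  split_ifs with h
  · rfl
  · exact pv_corr_symm gifts p x

lemma pvSumD_cons {α : Type} [DecidableEq α] (f : α → Int) (a : α) (t : List α) :
    pvSumD f (a :: t) = f a + pvSumD f (t.filter (· ≠ a)) := by
  rw [pvSumD]

lemma pv_upd_contains (friends : List String) (w : PySem.Dict String Int)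
    (k1 k2 : String) (A B S1 S2 v1 v2 v3 v4 : Int)
    (hw : ∀ y, w.contains y = decide (y ∈ friends)) (h1 : k1 ∈ friends) (h2 : k2 ∈ friends) :
    ∀ y, ((if A > B
            then (if S1 > S2 then w.insert k1 v1 else if S1 < S2 then w.insert k2 v2 else w).insert k1 v3
            else (if S1 > S2 then w.insert k1 v1 else if S1 < S2 then w.insert k2 v2 else w).insert k2 v4).contains y)
          = decide (y ∈ friends) := by
  intro y
  split_ifs <;> (repeat rw [PySem.Dict.contains_insert]) <;> rw [hw] <;>
    by_cases hy1 : y = k1 <;> by_cases hy2 : y = k2 <;>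
      first | simp [beq_eq_decide, hy1, hy2, h1, h2] | rfl

lemma pv_upd_getD (w : PySem.Dict String Int) (k1 k2 x : String) (A B S1 S2 : Int)
    (hne : k1 ≠ k2) (hAB : ¬ A = B) :
    ((if A > B
        then (if S1 > S2 then w.insert k1 (w.getD k1 0 - 1)
              else if S1 < S2 then w.insert k2 (w.getD k2 0 - 1) else w).insert k1
             ((if S1 > S2 then w.insert k1 (w.getD k1 0 - 1)
              else if S1 < S2 then w.insert k2 (w.getD k2 0 - 1) else w).getD k1 0 + 1)
        else (if S1 > S2 then w.insert k1 (w.getD k1 0 - 1)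
              else if S1 < S2 then w.insert k2 (w.getD k2 0 - 1) else w).insert k2
             ((if S1 > S2 then w.insert k1 (w.getD k1 0 - 1)
              else if S1 < S2 then w.insert k2 (w.getD k2 0 - 1) else w).getD k2 0 + 1)).getD x 0)
      = w.getD x 0
        + ((if B < A then (if k1 = x then (1 : Int) else 0) else (if k2 = x then (1 : Int) else 0))
           - (if S2 < S1 then (if k1 = x then (1 : Int) else 0)
              else if S1 < S2 then (if k2 = x then (1 : Int) else 0) else 0)) := by
  split_ifs <;> (repeat rw [PySem.Dict.getD_insert]) <;> split_ifs <;> subst_vars <;>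
    first | omega | (exact absurd rfl hne) | (exact absurd rfl (by assumption))

lemma pv_corr_fold (gifts friends : List String)
    (cnt : PySem.Dict (String × String) Int) (fscore : PySem.Dict String Int)
    (ha : ∀ p : String × String, cnt.getD p 0 = (List.count (pvKey p.1 p.2) gifts : Int))
    (hs : ∀ y ∈ friends, fscore.getD y 0 = pvScore gifts y) :
    ∀ (K : List (String × String)) (done : PySem.Set (String × String))
      (w : PySem.Dict String Int),
    (∀ y, w.contains y = decide (y ∈ friends)) → ∀ x,
    ((K.foldl (pvCorrStep cnt fscore) (done, w)).2).getD x 0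
      = w.getD x 0 + pvSumD (fun c => pvCorr gifts c x)
          (((K.filter (pvElig friends)).map pvCanonP).filter
            (fun c => !(PySem.Set.contains done c))) := by
  intro K
  induction K with
  | nil => intro done w hw x; simp [pvSumD]
  | cons k K ih =>
    intro done w hw x
    rw [List.foldl_cons]
    by_cases he : pvElig friends k = true
    · -- eligible
      have hne : k.1 ≠ k.2 := by
        simp only [pvElig, Bool.and_eq_true, decide_eq_true_eq] at he; exact he.1.1
      have h1 : k.1 ∈ friends := by
        simp only [pvElig, Bool.and_eq_true, decide_eq_true_eq] at he; exact he.1.2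
      have h2 : k.2 ∈ friends := by
        simp only [pvElig, Bool.and_eq_true, decide_eq_true_eq] at he; exact he.2
      have hguard : ¬ (k.1 = k.2 ∨ ¬ w.contains k.1 ∨ ¬ w.contains k.2) := by
        rw [hw, hw]
        push_neg
        exact ⟨hne, by simpa using h1, by simpa using h2⟩
      by_cases hdone : PySem.Set.contains done (pvCanonP k) = true
      · -- canon already done: step is a no-op, list head is filtered away
        have hstep : pvCorrStep cnt fscore (done, w) k = (done, w) := by
          unfold pvCorrStep
          rw [if_neg hguard]
          simp only []
          rw [show (if k.1 < k.2 then k else (k.2, k.1)) = pvCanonP k from rfl, hdone]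
          simp
        rw [hstep, ih done w hw x]
        congr 1
        rw [List.filter_cons]
        simp only [he, if_true]
        rw [List.map_cons, List.filter_cons, hdone]
        simp
      · -- new pair: processed
        have hdone' : PySem.Set.contains done (pvCanonP k) = false := by simpa using hdone
        -- the step
        set a := cnt.getD k 0 with hadef
        set b := cnt.getD (k.2, k.1) 0 with hbdef
        have hstep : pvCorrStep cnt fscore (done, w) k
            = (PySem.Set.add done (pvCanonP k),
               if a = b then w
               else
                 let w1 := if fscore.getD k.1 0 > fscore.getD k.2 0 then w.insert k.1 (w.getD k.1 0 - 1)
                           else if fscore.getD k.1 0 < fscore.getD k.2 0 then w.insert k.2 (w.getD k.2 0 - 1)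
                           else w
                 if a > b then w1.insert k.1 (w1.getD k.1 0 + 1) else w1.insert k.2 (w1.getD k.2 0 + 1)) := by
          unfold pvCorrStep
          rw [if_neg hguard]
          simp only []
          rw [show (if k.1 < k.2 then k else (k.2, k.1)) = pvCanonP k from rfl, hdone']
          by_cases hab : a = b <;> simp [hab, ← hadef, ← hbdef]
        rw [hstep]
        -- name the updated dict
        set w' := (if a = b then w
               else
                 let w1 := if fscore.getD k.1 0 > fscore.getD k.2 0 then w.insert k.1 (w.getD k.1 0 - 1)
                           else if fscore.getD k.1 0 < fscore.getD k.2 0 then w.insert k.2 (w.getD k.2 0 - 1)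
                           else w
                 if a > b then w1.insert k.1 (w1.getD k.1 0 + 1) else w1.insert k.2 (w1.getD k.2 0 + 1)) with hw'def
        have hw' : ∀ y, w'.contains y = decide (y ∈ friends) := by
          intro y
          rw [hw'def]
          by_cases hab : a = b
          · rw [if_pos hab]; exact hw y
          · rw [if_neg hab]
            exact pv_upd_contains friends w k.1 k.2 a b (fscore.getD k.1 0) (fscore.getD k.2 0)
              _ _ _ _ hw h1 h2 y
        have hcnt_a : a = (List.count (pvKey k.1 k.2) gifts : Int) := by rw [hadef, ha k]
        have hcnt_b : b = (List.count (pvKey k.2 k.1) gifts : Int) := by rw [hbdef, ha (k.2, k.1)]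
        have hval : w'.getD x 0 = w.getD x 0 + pvCorr gifts k x := by
          rw [hw'def]
          unfold pvCorr
          rw [← hcnt_a, ← hcnt_b]
          by_cases hab : a = b
          · rw [if_pos hab, if_pos hab, add_zero]
          · rw [if_neg hab, if_neg hab, hs k.1 h1, hs k.2 h2]
            exact pv_upd_getD w k.1 k.2 x a b (pvScore gifts k.1) (pvScore gifts k.2) hne hab
        rw [ih _ w' hw' x, hval]
        -- list side
        rw [List.filter_cons]
        simp only [he, if_true]
        rw [List.map_cons, List.filter_cons]
        simp only [hdone', Bool.not_false, if_true]
        rw [pvSumD_cons, pv_corr_canon]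
        have hfil : (List.filter (fun c => !PySem.Set.contains done c)
                ((K.filter (pvElig friends)).map pvCanonP)).filter (· ≠ pvCanonP k)
            = List.filter (fun c => !PySem.Set.contains (PySem.Set.add done (pvCanonP k)) c)
                ((K.filter (pvElig friends)).map pvCanonP) := by
          rw [List.filter_filter]
          apply List.filter_congr
          intro c _
          by_cases hc1 : c ∈ done <;> by_cases hc2 : c = pvCanonP k <;>
            simp [PySem.Set.contains_iff, PySem.Set.mem_add, hc1, hc2]
        rw [hfil]
        ring
    · -- not eligible: guard holds, no-op
      have he' : pvElig friends k = false := by simpa using he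
      have hguard : (k.1 = k.2 ∨ ¬ w.contains k.1 ∨ ¬ w.contains k.2) := by
        simp only [pvElig, Bool.and_eq_true, decide_eq_true_eq] at he'
        rw [hw, hw]
        by_cases e1 : k.1 = k.2
        · exact Or.inl e1
        · by_cases e2 : k.1 ∈ friends
          · right; right; simp only [decide_eq_true_eq]; intro hc; exact (by simp [e1, e2, hc] at he')
          · right; left; simpa using e2
      have hstep : pvCorrStep cnt fscore (done, w) k = (done, w) := by
        unfold pvCorrStep
        rw [if_pos hguard]
      rw [hstep, ih done w hw x]
      congr 2
      simp [List.filter_cons, he']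


-- ---------- pvSumD as a Finset sum, and the pair/friend bijection ----------

lemma pv_filter_ne_toFinset {α : Type} [DecidableEq α] (t : List α) (a : α) :
    (t.filter (· ≠ a)).toFinset = t.toFinset.erase a := by
  ext x
  simp [Finset.mem_erase, and_comm]

lemma pv_sumD_toFinset_aux {α : Type} [DecidableEq α] (f : α → Int) :
    ∀ (n : Nat) (L : List α), L.length ≤ n → pvSumD f L = ∑ x ∈ L.toFinset, f x := by
  intro n
  induction n with
  | zero =>
    intro L hL
    rw [Nat.le_zero, List.length_eq_zero_iff] at hL
    subst hL
    simp [pvSumD]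
  | succ n ih =>
    intro L hL
    cases L with
    | nil => simp [pvSumD]
    | cons a t =>
      rw [pvSumD, ih _ (le_trans (List.length_filter_le _ _) (by simpa using hL)),
        pv_filter_ne_toFinset]
      have : (a :: t).toFinset = insert a (t.toFinset.erase a) := by
        ext x
        simp [Finset.mem_insert, Finset.mem_erase]
        constructor
        · rintro (rfl | hx)
          · exact Or.inl rfl
          · by_cases hxa : x = a
            · exact Or.inl hxa
            · exact Or.inr ⟨hxa, hx⟩
        · rintro (rfl | ⟨_, hx⟩)
          · exact Or.inl rfl
          · exact Or.inr hx
      rw [this, Finset.sum_insert (Finset.notMem_erase a t.toFinset)]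

lemma pv_sumD_toFinset {α : Type} [DecidableEq α] (f : α → Int) (L : List α) :
    pvSumD f L = ∑ x ∈ L.toFinset, f x :=
  pv_sumD_toFinset_aux f L.length L le_rfl


lemma pv_corr_zero_of_notmem (gifts : List String) (p : String × String) (x : String)
    (h1 : p.1 ≠ x) (h2 : p.2 ≠ x) : pvCorr gifts p x = 0 := by
  unfold pvCorr; split_ifs <;> simp_all

lemma pv_canonP_swap (p : String × String) (hne : p.1 ≠ p.2) :
    pvCanonP (p.2, p.1) = pvCanonP p := by
  unfold pvCanonP
  rcases lt_trichotomy p.1 p.2 with h | h | h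
  · rw [if_pos h, if_neg (not_lt_of_gt h)]
  · exact absurd h hne
  · rw [if_neg (not_lt_of_gt h), if_pos h]

lemma pv_canonP_lt (p : String × String) (hne : p.1 ≠ p.2) :
    (pvCanonP p).1 < (pvCanonP p).2 := by
  unfold pvCanonP
  rcases lt_trichotomy p.1 p.2 with h | h | h
  · rw [if_pos h]; exact h
  · exact absurd h hne
  · rw [if_neg (not_lt_of_gt h)]; exact h

lemma pv_canonP_fix (c : String × String) (h : c.1 < c.2) : pvCanonP c = c := by
  unfold pvCanonP; rw [if_pos h]

lemma pv_corr_counts_ne (gifts : List String) (p : String × String) (x : String)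
    (h : pvCorr gifts p x ≠ 0) :
    ¬ ((List.count (pvKey p.1 p.2) gifts : Int) = (List.count (pvKey p.2 p.1) gifts : Int)) := by
  intro he
  exact h (by unfold pvCorr; rw [if_pos he])

-- Σ over friends of the correction affecting f = Σ over the distinct eligible canonical pairs
lemma pv_corr_sum (gifts friends : List String) (hnd : friends.Nodup)
    (hg : ∀ g ∈ gifts, pvCanonGift g) (f : String) (hf : f ∈ friends) :
    (friends.map (fun g => pvCorr gifts (f, g) f)).sum
      = pvSumD (fun c => pvCorr gifts c f)
          (((PySem.Set.ofList (gifts.map pvPairOf)).filter (pvElig friends)).map pvCanonP) := by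
  rw [pv_sumD_toFinset, ← List.sum_toFinset _ hnd]
  rw [← Finset.sum_filter_ne_zero (friends.toFinset) (f := fun g => pvCorr gifts (f, g) f)]
  rw [← Finset.sum_filter_ne_zero (_ : Finset (String × String))]
  set L := ((PySem.Set.ofList (gifts.map pvPairOf)).filter (pvElig friends)).map pvCanonP with hL
  have hmemL : ∀ c, c ∈ L ↔ ∃ k, k ∈ gifts.map pvPairOf ∧ pvElig friends k = true ∧ pvCanonP k = c := by
    intro c
    rw [hL, List.mem_map]
    constructor
    · rintro ⟨k, hk, rfl⟩
      rw [List.mem_filter] at hk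
      exact ⟨k, (PySem.Set.mem_ofList _ _).mp hk.1, hk.2, rfl⟩
    · rintro ⟨k, hk1, hk2, rfl⟩
      exact ⟨k, List.mem_filter.mpr ⟨(PySem.Set.mem_ofList _ _).mpr hk1, hk2⟩, rfl⟩
  have hLfacts : ∀ c ∈ L, c.1 < c.2 ∧ c.1 ∈ friends ∧ c.2 ∈ friends := by
    intro c hc
    obtain ⟨k, _, helig, rfl⟩ := (hmemL c).mp hc
    have hk1 : k.1 ≠ k.2 := by
      simp only [pvElig, Bool.and_eq_true, decide_eq_true_eq] at helig; exact helig.1.1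
    have hk2 : k.1 ∈ friends := by
      simp only [pvElig, Bool.and_eq_true, decide_eq_true_eq] at helig; exact helig.1.2
    have hk3 : k.2 ∈ friends := by
      simp only [pvElig, Bool.and_eq_true, decide_eq_true_eq] at helig; exact helig.2
    refine ⟨pv_canonP_lt k hk1, ?_, ?_⟩ <;> (unfold pvCanonP; split_ifs) <;> assumption
  apply Finset.sum_nbij' (i := fun g => pvCanonP (f, g)) (j := fun c => if c.1 = f then c.2 else c.1)
  · -- hi
    intro g hgm
    rw [Finset.mem_filter, List.mem_toFinset] at hgm
    obtain ⟨hgf, hcz⟩ := hgm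
    have hcne := pv_corr_counts_ne gifts (f, g) f hcz
    simp only at hcne
    have hgf' : g ≠ f := by rintro rfl; exact hcne rfl
    have hfg : f ≠ g := Ne.symm hgf'
    rw [Finset.mem_filter, List.mem_toFinset]
    refine ⟨?_, by rw [pv_corr_canon]; exact hcz⟩
    rw [pv_count_key gifts hg f g, pv_count_key gifts hg g f] at hcne
    by_cases hmem : (f, g) ∈ gifts.map pvPairOf
    · exact (hmemL _).mpr ⟨(f, g), hmem, by simp [pvElig, hf, hgf, hfg], rfl⟩
    · have hmem2 : (g, f) ∈ gifts.map pvPairOf := by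
        by_contra hmem2
        apply hcne
        rw [List.count_eq_zero_of_not_mem hmem, List.count_eq_zero_of_not_mem hmem2]
      exact (hmemL _).mpr ⟨(g, f), hmem2, by simp [pvElig, hf, hgf, hgf'],
        pv_canonP_swap (f, g) hfg⟩
  · -- hj
    intro c hcm
    rw [Finset.mem_filter, List.mem_toFinset] at hcm
    obtain ⟨hcl, hcz⟩ := hcm
    obtain ⟨hlt, hm1, hm2⟩ := hLfacts c hcl
    have hor : c.1 = f ∨ c.2 = f := by
      by_contra hno
      push_neg at hno
      exact hcz (pv_corr_zero_of_notmem gifts c f hno.1 hno.2)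
    rw [Finset.mem_filter, List.mem_toFinset]
    by_cases h1 : c.1 = f
    · rw [if_pos h1]
      refine ⟨hm2, ?_⟩
      have : (f, c.2) = c := by rw [← h1]
      rw [this]; exact hcz
    · rw [if_neg h1]
      have h2 : c.2 = f := hor.resolve_left h1
      refine ⟨hm1, ?_⟩
      have : (f, c.1) = ((c.1, c.2).2, (c.1, c.2).1) := by rw [← h2]
      rw [this, pv_corr_symm]
      have : ((c.1 : String), (c.2 : String)) = c := rfl
      rw [this]; exact hcz
  · -- left_inv
    intro g hgm
    rw [Finset.mem_filter, List.mem_toFinset] at hgm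
    obtain ⟨hgf, hcz⟩ := hgm
    have hcne := pv_corr_counts_ne gifts (f, g) f hcz
    have hgf' : g ≠ f := by rintro rfl; exact hcne rfl
    by_cases hlt : f < g
    · rw [pv_canonP_fix (f, g) hlt]
      simp
    · have hglt : g < f := lt_of_le_of_ne (not_lt.mp hlt) hgf'
      have : pvCanonP (f, g) = (g, f) := by
        unfold pvCanonP
        rw [if_neg hlt]
      rw [this]
      simp [hgf']
  · -- right_inv
    intro c hcm
    rw [Finset.mem_filter, List.mem_toFinset] at hcm
    obtain ⟨hcl, hcz⟩ := hcm
    obtain ⟨hlt, hm1, hm2⟩ := hLfacts c hcl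
    have hor : c.1 = f ∨ c.2 = f := by
      by_contra hno
      push_neg at hno
      exact hcz (pv_corr_zero_of_notmem gifts c f hno.1 hno.2)
    by_cases h1 : c.1 = f
    · rw [if_pos h1]
      have : (f, c.2) = c := by rw [← h1]
      rw [this, pv_canonP_fix c hlt]
    · rw [if_neg h1]
      have h2 : c.2 = f := hor.resolve_left h1
      have he : (f, c.1) = ((c.1, c.2).2, (c.1, c.2).1) := by rw [← h2]
      rw [he, pv_canonP_swap (c.1, c.2) (ne_of_lt hlt)]
      rw [pv_canonP_fix (c.1, c.2) hlt]
  · -- values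
    intro g hgm
    rw [pv_corr_canon]


-- ---------- the pointwise win identity ----------

lemma pv_point (gifts : List String) (f g : String) :
    (if (g != f && pvBeats gifts f g) then (1 : Int) else 0)
      = (if pvScore gifts g < pvScore gifts f then (1 : Int) else 0) + pvCorr gifts (f, g) f := by
  unfold pvBeats pvCorr
  by_cases hgf : g = f
  · subst hgf
    simp
  · simp only [bne_iff_ne, ne_eq, hgf, not_false_eq_true, decide_true, Bool.true_and,
      Bool.or_eq_true, Bool.and_eq_true, decide_eq_true_eq]
    split_ifs <;> simp_all <;> omega

-- ---------- A equals the canonical value ----------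

-- all ordered pairs (earlier element, later element) of a list
def pvPairs {α : Type} : List α → List (α × α)
  | [] => []
  | a :: t => t.map (fun y => (a, y)) ++ pvPairs t

def pvBump (c : PySem.Dict String Int) (x : String) : PySem.Dict String Int :=
  c.insert x (c.getD x 0 + 1)

-- canonical form of A's pair-adjudication step, for a strict win relation W
def pvStepW (W : String → String → Bool) (f r : String) (c : PySem.Dict String Int) :
    PySem.Dict String Int :=
  if f ≠ r ∧ W f r then pvBump c f else if f ≠ r ∧ W r f then pvBump c r else c

-- 'this pair bumps x's counter'
def pvPairPred (W : String → String → Bool) (x : String) (p : String × String) : Bool :=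
  (decide (p.1 = x) && decide (p.1 ≠ p.2) && W p.1 p.2)
    || (decide (p.2 = x) && decide (p.1 ≠ p.2) && W p.2 p.1)

lemma pv_set_eq_add (sc : PySem.Dict String Int) (s : String) (v : Int) (x : String) :
    ((if sc.contains s then sc.insert s (sc.getD s 0 + v) else sc.insert s v).getD x 0)
      = sc.getD x 0 + (if s = x then v else 0) := by
  by_cases hc : sc.contains s = true
  · simp only [hc, if_true, PySem.Dict.getD_insert]
    split_ifs <;> subst_vars <;> first | omega | exact absurd rfl (by assumption)
  · have hb : sc.contains s = false := by simpa using hc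
    have h0 : sc.getD s 0 = 0 := PySem.Dict.getD_of_not_contains sc 0 hb
    simp only [hb, Bool.false_eq_true, if_false, PySem.Dict.getD_insert]
    split_ifs <;> subst_vars <;> first | omega | exact absurd rfl (by assumption)

lemma pv_set_eq_sub (sc : PySem.Dict String Int) (r : String) (v : Int) (x : String) :
    ((if sc.contains r then sc.insert r (sc.getD r 0 - v) else sc.insert r (-v)).getD x 0)
      = sc.getD x 0 - (if r = x then v else 0) := by
  by_cases hc : sc.contains r = true
  · simp only [hc, if_true, PySem.Dict.getD_insert]
    split_ifs <;> subst_vars <;> first | omega | exact absurd rfl (by assumption)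
  · have hb : sc.contains r = false := by simpa using hc
    have h0 : sc.getD r 0 = 0 := PySem.Dict.getD_of_not_contains sc 0 hb
    simp only [hb, Bool.false_eq_true, if_false, PySem.Dict.getD_insert]
    split_ifs <;> subst_vars <;> first | omega | exact absurd rfl (by assumption)

lemma pv_stepA_getD (log sc : PySem.Dict String Int) (i x : String) :
    (pvScoreStepA log sc i).getD x 0 = sc.getD x 0 + log.getD i 0 * pvDelta i x := by
  unfold pvScoreStepA pvDelta
  rcases h : PySem.Str.split₀ i with _ | ⟨s, _ | ⟨r, _ | _⟩⟩ <;> try simp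
  rw [pv_set_eq_sub, pv_set_eq_add]
  split_ifs <;> subst_vars <;> ring

lemma pv_scoreA_fold (log : PySem.Dict String Int) (ks : List String)
    (sc : PySem.Dict String Int) (x : String) :
    (ks.foldl (pvScoreStepA log) sc).getD x 0
      = sc.getD x 0 + (ks.map (fun i => log.getD i 0 * pvDelta i x)).sum := by
  induction ks generalizing sc with
  | nil => simp
  | cons k ks ih => simp [List.foldl_cons, ih, pv_stepA_getD]; ring

lemma pv_sum_ite_single (S : List String) (hS : S.Nodup) (x : String) (f : String → Int) :
    (S.map (fun k => if k = x then f k else 0)).sum = if x ∈ S then f x else 0 := by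
  induction S with
  | nil => simp
  | cons a S ih =>
    simp only [List.nodup_cons] at hS
    rcases hS with ⟨ha, hS⟩
    simp only [List.map_cons, List.sum_cons, ih hS, List.mem_cons]
    by_cases hax : a = x
    · subst hax; simp [ha]
    · simp [hax, Ne.symm hax]

lemma pv_counter_sum (l : List String) (f : String → Int) :
    ((PySem.Set.ofList l).map (fun k => (List.count k l : Int) * f k)).sum = (l.map f).sum := by
  induction l using List.reverseRecOn with
  | nil => rfl
  | append_singleton xs x ih =>
    have hof : PySem.Set.ofList (xs ++ [x]) = PySem.Set.add (PySem.Set.ofList xs) x := by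
      rw [PySem.Set.ofList_eq_foldl, List.foldl_append, ← PySem.Set.ofList_eq_foldl]
      rfl
    have hnd : (PySem.Set.ofList xs).Nodup := PySem.Set.nodup_ofList xs
    have hmem : ∀ k, k ∈ PySem.Set.ofList xs ↔ k ∈ xs := fun k => PySem.Set.mem_ofList xs k
    have hcnt : ∀ k : String, ((xs ++ [x]).count k : Int)
        = (xs.count k : Int) + (if k = x then 1 else 0) := by
      intro k
      rw [List.count_append]
      by_cases hkx : k = x <;> simp [hkx, List.count_eq_zero]
    have hsplit : ∀ (S : List String), S.Nodup → (x ∈ S ↔ x ∈ xs) →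
        (S.map (fun k => ((xs ++ [x]).count k : Int) * f k)).sum
        = (S.map (fun k => (xs.count k : Int) * f k)).sum + (if x ∈ xs then f x else 0) := by
      intro S hS hxS
      have : (S.map (fun k => ((xs ++ [x]).count k : Int) * f k)).sum
          = (S.map (fun k => (xs.count k : Int) * f k + (if k = x then f k else 0))).sum := by
        congr 1
        apply List.map_congr_left
        intro k _
        rw [hcnt k]
        by_cases hkx : k = x <;> simp [hkx] <;> ring
      rw [this, PySem.List.sum_map_add_int, pv_sum_ite_single S hS x f]
      simp only [hxS]
    rw [hof]
    unfold PySem.Set.add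
    by_cases hc : (PySem.Set.ofList xs).contains x = true
    · have hx : x ∈ xs := by
        simpa [PySem.Set.contains, PySem.Set.mem_ofList] using hc
      rw [if_pos hc, hsplit _ hnd (hmem x), ih, if_pos hx]
      simp [List.map_append]
    · have hx : x ∉ xs := by
        intro h'
        exact hc (by simpa [PySem.Set.contains, PySem.Set.mem_ofList] using h')
      rw [if_neg hc]
      rw [List.map_append, List.sum_append, hsplit _ hnd (hmem x), ih, if_neg hx]
      simp [List.count_eq_zero_of_not_mem hx]

lemma pv_init_getD (friends : List String) (d : PySem.Dict String Int) (x : String)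
    (h : d.getD x 0 = 0) :
    (friends.foldl (fun d i => d.insert i 0) d).getD x 0 = 0 := by
  induction friends generalizing d with
  | nil => simpa using h
  | cons a t ih =>
    simp only [List.foldl_cons]
    apply ih
    rw [PySem.Dict.getD_insert]
    split_ifs <;> simp [h]

lemma pv_tri_pairs {α σ : Type} (xs : List α) (d : α) (g : α → α → σ → σ) (c0 : σ) :
    (List.range xs.length).foldl
      (fun c k => (xs.drop (k + 1)).foldl (fun c y => g (xs.getD k d) y c) c) c0
    = (pvPairs xs).foldl (fun c p => g p.1 p.2 c) c0 := by
  induction xs generalizing c0 with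
  | nil => simp [pvPairs]
  | cons a t ih =>
    simp only [List.length_cons, List.range_succ_eq_map, List.foldl_cons, pvPairs,
      List.foldl_append, List.foldl_map]
    rw [show ∀ c, (List.range t.length).foldl
        (fun c k => (((a :: t).drop (k + 1 + 1)).foldl (fun c y => g ((a :: t).getD (k + 1) d) y c) c)) c
        = (List.range t.length).foldl
        (fun c k => ((t.drop (k + 1)).foldl (fun c y => g (t.getD k d) y c) c)) c from
      fun c => by
        apply PySem.List.foldl_congr_mem
        intro acc k hk
        simp [List.drop_succ_cons]]
    rw [ih]
    congr 1

lemma pv_stepW_getD (W : String → String → Bool)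
    (hasym : ∀ f r, W f r = true → W r f = false)
    (f r : String) (c : PySem.Dict String Int) (x : String) :
    (pvStepW W f r c).getD x 0
      = c.getD x 0 + (if pvPairPred W x (f, r) then 1 else 0) := by
  by_cases hfr : f = r
  · subst hfr; simp [pvStepW, pvPairPred]
  · by_cases h1 : W f r = true
    · have h2 := hasym f r h1
      simp [pvStepW, pvPairPred, pvBump, hfr, h1, h2, PySem.Dict.getD_insert]
      split_ifs <;> subst_vars <;> simp_all
    · have h1' : W f r = false := by simpa using h1
      by_cases h2 : W r f = true
      · simp [pvStepW, pvPairPred, pvBump, hfr, h1', h2, PySem.Dict.getD_insert]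
        split_ifs <;> subst_vars <;> simp_all
      · have h2' : W r f = false := by simpa using h2
        simp [pvStepW, pvPairPred, hfr, h1', h2']

lemma pv_bumpfold_getD (W : String → String → Bool)
    (hasym : ∀ f r, W f r = true → W r f = false)
    (ps : List (String × String)) (d : PySem.Dict String Int) (x : String) :
    ((ps.foldl (fun c p => pvStepW W p.1 p.2 c) d).getD x 0)
      = d.getD x 0 + (ps.countP (pvPairPred W x) : Int) := by
  induction ps generalizing d with
  | nil => simp
  | cons p ps ih =>
    simp only [List.foldl_cons, ih, pv_stepW_getD W hasym, List.countP_cons]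
    split_ifs <;> push_cast <;> omega

lemma pv_bumpfold_keys (W : String → String → Bool) (ps : List (String × String))
    (d : PySem.Dict String Int) (h : ∀ p ∈ ps, p.1 ∈ d.keys ∧ p.2 ∈ d.keys) :
    (ps.foldl (fun c p => pvStepW W p.1 p.2 c) d).keys = d.keys := by
  induction ps generalizing d with
  | nil => rfl
  | cons p ps ih =>
    have hp := h p (by simp)
    have hkeys : (pvStepW W p.1 p.2 d).keys = d.keys := by
      unfold pvStepW pvBump
      split_ifs
      · rw [PySem.Dict.keys_insert_of_contains]
        rw [PySem.Dict.contains_iff_mem_keys]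
        exact hp.1
      · rw [PySem.Dict.keys_insert_of_contains]
        rw [PySem.Dict.contains_iff_mem_keys]
        exact hp.2
      · rfl
    simp only [List.foldl_cons]
    rw [ih _ (fun q hq => by rw [hkeys]; exact h q (by simp [hq])), hkeys]

lemma pv_pairs_mem {α : Type} (xs : List α) (p : α × α) (h : p ∈ pvPairs xs) :
    p.1 ∈ xs ∧ p.2 ∈ xs := by
  induction xs with
  | nil => simp [pvPairs] at h
  | cons a t ih =>
    simp only [pvPairs, List.mem_append, List.mem_map] at h
    rcases h with ⟨y, hy, rfl⟩ | h
    · exact ⟨by simp, by simp [hy]⟩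
    · exact ⟨by simp [(ih h).1], by simp [(ih h).2]⟩

lemma pv_pairs_countP (W : String → String → Bool)
    (xs : List String) (hnd : xs.Nodup) (x : String) (hx : x ∈ xs) :
    (pvPairs xs).countP (pvPairPred W x)
      = xs.countP (fun y => decide (y ≠ x) && W x y) := by
  induction xs with
  | nil => simp at hx
  | cons a t ih =>
    simp only [List.nodup_cons] at hnd
    rcases hnd with ⟨hat, hnd⟩
    simp only [pvPairs, List.countP_append, List.countP_cons, List.countP_map]
    rcases List.mem_cons.mp hx with rfl | hxt
    · have h1 : t.countP (pvPairPred W x ∘ fun y => (x, y))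
          = t.countP (fun y => decide (y ≠ x) && W x y) := by
        apply List.countP_congr
        intro y hy
        have hya : y ≠ x := fun e => hat (e ▸ hy)
        simp [pvPairPred, Function.comp, hya, Ne.symm hya]
      have h2 : (pvPairs t).countP (pvPairPred W x) = 0 := by
        rw [List.countP_eq_zero]
        intro p hp
        have hm := pv_pairs_mem t p hp
        have h1' : p.1 ≠ x := fun e => hat (e ▸ hm.1)
        have h2' : p.2 ≠ x := fun e => hat (e ▸ hm.2)
        simp [pvPairPred, h1', h2']
      simp [h1, h2]
    · have hax : a ≠ x := fun e => hat (e ▸ hxt)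
      have h1 : t.countP (pvPairPred W x ∘ fun y => (a, y))
          = t.countP (fun y => decide (y = x) && W x a) := by
        apply List.countP_congr
        intro y hy
        by_cases hyx : y = x
        · subst hyx
          simp [pvPairPred, Function.comp, hax]
        · simp [pvPairPred, Function.comp, hax, hyx]
      have h2 : t.countP (fun y => decide (y = x) && W x a)
          = if W x a then 1 else 0 := by
        by_cases hw : W x a = true
        · simp only [hw, Bool.and_true]
          have : t.countP (fun y => decide (y = x)) = t.count x := by
            unfold List.count
            apply List.countP_congr
            intro y _
            by_cases h : y = x <;> simp [h]
          rw [this, List.count_eq_one_of_mem hnd hxt]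
          simp
        · have hw' : W x a = false := by simpa using hw
          simp [hw']
      rw [ih hnd hxt]
      simp only [h1, h2]
      have hpred_a : (decide (a ≠ x) && W x a) = W x a := by simp [hax]
      rw [hpred_a]
      by_cases hw : W x a = true <;> simp [hw] <;> omega

-- A's "f_to_r = log[...] if ... in log else 0" is exactly the count of that gift string
lemma pv_log_lookup (gifts : List String) (k : String) :
    (if (PySem.Dict.counter gifts).contains k then (PySem.Dict.counter gifts).getD k 0 else 0)
      = (List.count k gifts : Int) := by
  by_cases hc : (PySem.Dict.counter gifts).contains k = true
  · rw [if_pos hc, PySem.Dict.getD_counter]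
  · have hb : gifts.contains k = false := by
      have := PySem.Dict.contains_counter gifts k
      rw [← this]; simpa using hc
    have hk : k ∉ gifts := by simpa using hb
    rw [if_neg hc, List.count_eq_zero_of_not_mem hk]
    simp

-- the strict win relation is asymmetric
lemma pv_beats_asym (gifts : List String) :
    ∀ f r, pvBeats gifts f r = true → pvBeats gifts r f = false := by
  intro f r h
  simp only [pvBeats] at h ⊢
  simp only [Bool.or_eq_true, Bool.and_eq_true, decide_eq_true_eq] at h
  simp only [Bool.or_eq_false_iff, Bool.and_eq_false_iff, decide_eq_false_iff_not, not_lt]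
  omega

lemma pv_A_canon (friends gifts : List String) (hnd : friends.Nodup) :
    solution friends gifts = pvCanon friends gifts := by
  simp only [solution, pvCanon]
  -- the score dict A builds agrees with pvScore everywhere
  have hinit : pvInitA friends
      = (friends.foldl (fun d i => d.insert i 0) PySem.Dict.empty,
         friends.foldl (fun d i => d.insert i 0) PySem.Dict.empty) := by
    unfold pvInitA
    rw [PySem.List.foldl_prod_mk (f := fun (d : PySem.Dict String Int) (i : String) => d.insert i 0) (g := fun (d : PySem.Dict String Int) (i : String) => d.insert i 0)]
  have hinit1 : ∀ x, (pvInitA friends).1.getD x 0 = 0 := by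
    intro x; rw [hinit]; exact pv_init_getD friends _ x (by simp)
  have hinit2 : ∀ x, (pvInitA friends).2.getD x 0 = 0 := by
    intro x; rw [hinit]; exact pv_init_getD friends _ x (by simp)
  have hkeys0 : (pvInitA friends).1.keys = friends := by
    rw [hinit]
    rw [PySem.Dict.keys_foldl_insert (f := fun _ _ => (0 : Int))]
    rw [PySem.Dict.keys_empty]
    have : PySem.Set.update [] friends = PySem.Set.ofList friends := by
      rw [PySem.Set.ofList_eq_foldl]; rfl
    rw [this, PySem.Set.ofList_eq_self_of_nodup friends hnd]
  have hsc : ∀ x,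
      ((PySem.Dict.counter gifts).keys.foldl (pvScoreStepA (PySem.Dict.counter gifts))
        (pvInitA friends).2).getD x 0 = pvScore gifts x := by
    intro x
    rw [pv_scoreA_fold, hinit2, PySem.Dict.keys_counter]
    have hmapeq : (PySem.Set.ofList gifts).map
          (fun i => (PySem.Dict.counter gifts).getD i 0 * pvDelta i x)
        = (PySem.Set.ofList gifts).map (fun k => (List.count k gifts : Int) * pvDelta k x) := by
      apply List.map_congr_left
      intro i _
      rw [PySem.Dict.getD_counter]
    rw [hmapeq, pv_counter_sum]
    unfold pvScore
    simp
  -- A's pair step is the canonical step for the canonical win relation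
  have hasym := pv_beats_asym gifts
  have hstep : ∀ f r c,
      pvTriStepA (PySem.Dict.counter gifts)
        ((PySem.Dict.counter gifts).keys.foldl (pvScoreStepA (PySem.Dict.counter gifts))
          (pvInitA friends).2) f r c
      = pvStepW (pvBeats gifts) f r c := by
    intro f r c
    simp only [pvTriStepA, pvStepW, pvBeats, pvBump, pv_log_lookup, hsc]
    by_cases hfr : f = r
    · subst hfr; simp
    · simp only [ne_eq, hfr, not_false_iff, true_and]
      split_ifs <;>
        first
        | rfl
        | ((exfalso
            simp only [Bool.or_eq_true, Bool.and_eq_true, decide_eq_true_eq,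
              not_lt, not_or, not_and] at *) <;> omega)
  -- triangular index loop = fold over the ordered pairs
  have hlen : PySem.List.len friends = ((friends.length : Nat) : Int) := by
    simp [PySem.List.len]
  have houter :
      (PySem.List.pyRange 0 (PySem.List.len friends)).foldl (fun cnt fi =>
        (PySem.List.pyRange (fi + 1) (PySem.List.len friends)).foldl (fun cnt ri =>
          pvTriStepA (PySem.Dict.counter gifts)
            ((PySem.Dict.counter gifts).keys.foldl (pvScoreStepA (PySem.Dict.counter gifts))
              (pvInitA friends).2)
            (PySem.List.pyGetD friends fi "") (PySem.List.pyGetD friends ri "") cnt) cnt)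
        (pvInitA friends).1
      = (pvPairs friends).foldl
          (fun c p => pvStepW (pvBeats gifts) p.1 p.2 c)
          (pvInitA friends).1 := by
    rw [hlen, PySem.List.pyRange_zero_natCast, List.foldl_map]
    have hbody : ∀ (c : PySem.Dict String Int) (k : Nat), k ∈ List.range friends.length →
        (PySem.List.pyRange ((k : Int) + 1) ((friends.length : Nat) : Int)).foldl (fun cnt ri =>
          pvTriStepA (PySem.Dict.counter gifts)
            ((PySem.Dict.counter gifts).keys.foldl (pvScoreStepA (PySem.Dict.counter gifts))
              (pvInitA friends).2)
            (PySem.List.pyGetD friends (k : Int) "") (PySem.List.pyGetD friends ri "") cnt) c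
        = (friends.drop (k + 1)).foldl (fun cnt y =>
            pvStepW (pvBeats gifts) (friends.getD k "") y cnt) c := by
      intro c k _
      have h1 := PySem.List.foldl_pyRange_pyGetD friends ""
        (fun cnt y => pvTriStepA (PySem.Dict.counter gifts)
            ((PySem.Dict.counter gifts).keys.foldl (pvScoreStepA (PySem.Dict.counter gifts))
              (pvInitA friends).2)
            (PySem.List.pyGetD friends (k : Int) "") y cnt) c
        (a := (k : Int) + 1) (by positivity)
      rw [hlen] at h1
      rw [h1]
      have h2 : ((k : Int) + 1).toNat = k + 1 := by omega
      rw [h2]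
      apply PySem.List.foldl_congr_mem
      intro acc y _
      rw [hstep]
      congr 1
      rw [PySem.List.pyGetD_natCast]
    refine Eq.trans (PySem.List.foldl_congr_mem _ _ _ _ ?_)
      (pv_tri_pairs friends ""
        (fun f r c => pvStepW (pvBeats gifts) f r c)
        (pvInitA friends).1)
    intro acc k hk
    exact hbody acc k hk
  rw [houter]
  -- values of the final counter dict = the canonical per-friend counts
  have hkeysF : ((pvPairs friends).foldl
      (fun c p => pvStepW (pvBeats gifts) p.1 p.2 c)
      (pvInitA friends).1).keys = friends := by
    rw [pv_bumpfold_keys]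
    · exact hkeys0
    · intro p hp
      have hm := pv_pairs_mem friends p hp
      rw [hkeys0]
      exact hm
  have hvals : ((pvPairs friends).foldl
      (fun c p => pvStepW (pvBeats gifts) p.1 p.2 c)
      (pvInitA friends).1).values
      = friends.map (fun f => pvWins gifts friends f) := by
    rw [PySem.Dict.values_eq_map_keys _ (by rw [hkeysF]; exact hnd) 0, hkeysF]
    apply List.map_congr_left
    intro x hx
    rw [pv_bumpfold_getD _ hasym, hinit1,
      pv_pairs_countP _ friends hnd x hx]
    unfold pvWins
    have : friends.countP (fun y => decide (y ≠ x) && pvBeats gifts x y)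
        = friends.countP (fun g => g != x && pvBeats gifts x g) := by
      apply List.countP_congr
      intro y _
      simp [bne_iff_ne]
    rw [this]
    simp
  rw [hvals]


lemma pv_B_canon (friends gifts : List String) (hnd : friends.Nodup)
    (hg : ∀ g ∈ gifts, pvCanonGift g) :
    solution_alt friends gifts = pvCanon friends gifts := by
  have h2len : ∀ g ∈ gifts, (PySem.Str.split₀ g).length = 2 := fun g h => (hg g h).1
  unfold solution_alt
  rw [pv_passB_split]
  simp only []
  set scD := gifts.foldl pvScoreStepB PySem.Dict.empty with hscDdef
  set cntD := gifts.foldl pvCntStepB PySem.Dict.empty with hcntDdef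
  have hcnt : cntD = PySem.Dict.counter (gifts.map pvPairOf) := pv_cnt_eq_counter gifts h2len
  have ha : ∀ p : String × String, cntD.getD p 0 = (List.count (pvKey p.1 p.2) gifts : Int) := by
    intro p
    rw [hcnt, PySem.Dict.getD_counter, pv_count_key gifts hg p.1 p.2]
  have hscD : ∀ x, scD.getD x 0 = pvScore gifts x := by
    intro x
    rw [hscDdef, pv_scoreB_getD]
    simp
  set fscore := friends.foldl (fun d f => d.insert f (scD.getD f 0)) PySem.Dict.empty with hfsdef
  have hfs : ∀ y ∈ friends, fscore.getD y 0 = pvScore gifts y := by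
    intro y hy
    rw [hfsdef, pv_tab_getD, if_pos hy, hscD]
  set svals := PySem.List.sorted (friends.map (fun f => fscore.getD f 0)) (fun v => v) false
    with hsvdef
  have hsv : svals = PySem.List.sorted (friends.map (fun f => pvScore gifts f)) (fun v => v) false := by
    rw [hsvdef, List.map_congr_left hfs]
  set first := (PySem.List.enumerate svals).foldl pvFirstStep PySem.Dict.empty with hfirstdef
  have hbase : ∀ f ∈ friends, first.getD (fscore.getD f 0) 0
      = ((friends.countP (fun g => decide (pvScore gifts g < pvScore gifts f)) : Nat) : Int) := by
    intro f hfm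
    rw [hfs f hfm, hfirstdef, pv_first_getD]
    have hc0 : (PySem.Dict.empty : PySem.Dict Int Int).contains (pvScore gifts f) = false := by
      simp [PySem.Dict.empty, PySem.Dict.contains]
    rw [hc0]
    simp only [Bool.false_eq_true, if_false]
    have hmem : pvScore gifts f ∈ svals := by
      rw [hsv, PySem.List.mem_sorted]
      exact List.mem_map_of_mem hfm
    rw [if_pos hmem]
    have hpw : svals.Pairwise (fun a b => a ≤ b) := by
      rw [hsv]
      have := PySem.List.sorted_pairwise (friends.map (fun f => pvScore gifts f)) (fun v => v)
      simpa using this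
    rw [pv_idxOf_sorted svals hpw _ hmem]
    have hperm : svals.Perm (friends.map (fun f => pvScore gifts f)) := by
      rw [hsv]; exact PySem.List.sorted_perm _ _ _
    rw [hperm.countP_eq, List.countP_map]
    norm_num
    rfl
  set wins0 := friends.foldl (fun d f => d.insert f (first.getD (fscore.getD f 0) 0))
    PySem.Dict.empty with hw0def
  have hw0c : ∀ y, wins0.contains y = decide (y ∈ friends) := by
    intro y
    rw [hw0def, pv_tab_contains]
    have : (PySem.Dict.empty : PySem.Dict String Int).contains y = false := by
      simp [PySem.Dict.empty, PySem.Dict.contains]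
    rw [this]
    simp
  have hw0 : ∀ y ∈ friends, wins0.getD y 0
      = ((friends.countP (fun g => decide (pvScore gifts g < pvScore gifts y)) : Nat) : Int) := by
    intro y hy
    rw [hw0def, pv_tab_getD, if_pos hy]
    exact hbase y hy
  have hkeys : cntD.keys = PySem.Set.ofList (gifts.map pvPairOf) := by
    rw [hcnt, PySem.Dict.keys_counter]
  have hfold := pv_corr_fold gifts friends cntD fscore ha hfs cntD.keys
    PySem.Set.empty wins0 hw0c
  have hfilter : ∀ (Ks : List (String × String)),
      ((Ks.filter (pvElig friends)).map pvCanonP).filter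
        (fun c => !(PySem.Set.contains PySem.Set.empty c))
      = (Ks.filter (pvElig friends)).map pvCanonP := by
    intro Ks
    apply List.filter_eq_self.mpr
    intro c _
    rfl
  have hper : ∀ f ∈ friends,
      ((cntD.keys.foldl (pvCorrStep cntD fscore) (PySem.Set.empty, wins0)).2).getD f 0
      = pvWins gifts friends f := by
    intro f hfm
    rw [hfold f, hfilter, hkeys, hw0 f hfm, ← pv_corr_sum gifts friends hnd hg f hfm]
    unfold pvWins
    conv_rhs => rw [pv_countP_int]
    have hpt : (friends.map (fun g => if (g != f && pvBeats gifts f g) then (1 : Int) else 0))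
        = friends.map (fun g =>
            (if pvScore gifts g < pvScore gifts f then (1 : Int) else 0) + pvCorr gifts (f, g) f) := by
      apply List.map_congr_left
      intro g _
      exact pv_point gifts f g
    rw [hpt, PySem.List.sum_map_add_int]
    have hcint : ((friends.countP (fun g => decide (pvScore gifts g < pvScore gifts f)) : Nat) : Int)
        = (friends.map (fun g => if pvScore gifts g < pvScore gifts f then (1 : Int) else 0)).sum := by
      rw [pv_countP_int]
      congr 1
      apply List.map_congr_left
      intro g _
      split_ifs with h1 h2 h3 <;> first | rfl | (exfalso; simp_all)
    rw [hcint]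
  have hmap : friends.map (fun f =>
      ((cntD.keys.foldl (pvCorrStep cntD fscore) (PySem.Set.empty, wins0)).2).getD f 0)
      = friends.map (fun f => pvWins gifts friends f) :=
    List.map_congr_left hper
  rw [hmap]
  rfl


-- ===== VERDICT (by name: the statement is the Claim_ definition above) =====
theorem solution_spec : Claim_equal_solution := by
  intro friends gifts _hdom hpre
  obtain ⟨_hne, hnd, hgifts⟩ := hpre
  unfold Spec_solution
  rw [pv_A_canon friends gifts hnd, pv_B_canon friends gifts hnd (fun g hgm => hgifts g hgm)]
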